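-- pv_equiv track=rewrite | github.com/Arcetos/Snipcom | src/snipcom_app/gui/controllers/ai_controller.py | extract_paths_from_output
-- ===== SOURCE A (Python) =====
-- def extract_paths_from_output(output: str) -> list[str]:
--     paths: list[str] = []
--     for line in output.splitlines():
--         candidate = line.strip()
--         if not candidate:
--             continue
--         if candidate.startswith(("/", "./", "../", "~/")):
--             paths.append(candidate)
--     return paths[-5:]
-- ===== SOURCE B (Python) =====
-- def extract_paths_from_output(output: str) -> list[str]:
--     buf: list[str] = []
--     for line in reversed(output.splitlines()):
--         candidate = line.strip()
--         if candidate and candidate.startswith(("/", "./", "../", "~/")):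
--             buf.append(candidate)
--             if len(buf) == 5:
--                 break
--     buf.reverse()
--     return buf
-- ===== Notes on version B (the rewrite author's own statement) =====
-- stated objective: alternative
-- what changed: B scans the lines in reverse with early termination once five path-like candidates are buffered, then reverses the buffer, instead of collecting every match and slicing the last five.
import Mathlib
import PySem

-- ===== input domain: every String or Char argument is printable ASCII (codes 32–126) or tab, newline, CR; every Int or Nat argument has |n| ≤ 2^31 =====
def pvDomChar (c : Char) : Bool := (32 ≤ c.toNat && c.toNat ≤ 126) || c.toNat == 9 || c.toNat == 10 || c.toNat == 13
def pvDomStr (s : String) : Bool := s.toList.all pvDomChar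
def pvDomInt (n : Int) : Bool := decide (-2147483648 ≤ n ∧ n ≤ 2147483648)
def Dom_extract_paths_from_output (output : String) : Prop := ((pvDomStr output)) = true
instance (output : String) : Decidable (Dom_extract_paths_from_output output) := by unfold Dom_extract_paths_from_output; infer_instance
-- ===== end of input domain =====

-- B rewrites A as a reverse scan with early termination after five buffered matches;
-- objective: alternative (same cost, different traversal and state).

-- ===== PORT A =====
def extract_paths_from_output (output : String) : List String :=
  let paths : List String :=
    (PySem.Str.splitlines output).foldl (fun paths line =>
      let candidate := PySem.Str.strip line
      if candidate = "" then paths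
      else if PySem.Str.startswith candidate "/" || PySem.Str.startswith candidate "./" ||
              PySem.Str.startswith candidate "../" || PySem.Str.startswith candidate "~/" then
        paths ++ [candidate]
      else paths) []
  PySem.List.slice paths (some (-5)) none

-- ===== PORT B =====
def extract_paths_from_output_altGo : List String → List String → List String
  | [], buf => buf
  | line :: rest, buf =>
    let candidate := PySem.Str.strip line
    if candidate ≠ "" &&
       (PySem.Str.startswith candidate "/" || PySem.Str.startswith candidate "./" ||
        PySem.Str.startswith candidate "../" || PySem.Str.startswith candidate "~/") then
      let buf' := buf ++ [candidate]
      if buf'.length = 5 then buf' else extract_paths_from_output_altGo rest buf'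
    else extract_paths_from_output_altGo rest buf

def extract_paths_from_output_alt (output : String) : List String :=
  (extract_paths_from_output_altGo (PySem.Str.splitlines output).reverse []).reverse

-- ===== PRECONDITION & SPEC =====
def Spec_extract_paths_from_output (output : String) (out : List String) : Prop := out = extract_paths_from_output_alt output
instance (output : String) (out : List String) : Decidable (Spec_extract_paths_from_output output out) := by unfold Spec_extract_paths_from_output; infer_instance

-- ===== CLAIM (what is proved, stated in full; the proofs are below) =====
def Claim_equal_extract_paths_from_output : Prop := ∀ (output : String), Dom_extract_paths_from_output output → Spec_extract_paths_from_output output (extract_paths_from_output output)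

-- ===== LEMMAS AND PROOFS =====

-- the per-line test both programs perform: nonempty after strip and path-like prefix
def pvIsPath (line : String) : Bool :=
  PySem.Str.strip line ≠ "" &&
    (PySem.Str.startswith (PySem.Str.strip line) "/" || PySem.Str.startswith (PySem.Str.strip line) "./" ||
     PySem.Str.startswith (PySem.Str.strip line) "../" || PySem.Str.startswith (PySem.Str.strip line) "~/")

def pvExtract (line : String) : Option String :=
  if pvIsPath line then some (PySem.Str.strip line) else none

theorem filter_map_eq_filterMap (lines : List String) :
    (lines.filter pvIsPath).map PySem.Str.strip = lines.filterMap pvExtract := by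
  induction lines with
  | nil => rfl
  | cons line rest ih =>
    by_cases h : pvIsPath line = true
    · simp [pvExtract, h, ih]
    · simp [pvExtract, h, ih]

theorem foldA_eq (lines : List String) (acc : List String) :
    lines.foldl (fun paths line =>
      let candidate := PySem.Str.strip line
      if candidate = "" then paths
      else if PySem.Str.startswith candidate "/" || PySem.Str.startswith candidate "./" ||
              PySem.Str.startswith candidate "../" || PySem.Str.startswith candidate "~/" then
        paths ++ [candidate]
      else paths) acc = acc ++ lines.filterMap pvExtract := by
  rw [PySem.List.foldl_congr_mem
        (g := fun paths line => if pvIsPath line then paths ++ [PySem.Str.strip line] else paths)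
        (h := by
          intro paths line _
          by_cases h : PySem.Str.strip line = ""
          · simp [pvIsPath, h]
          · by_cases hs : (PySem.Str.startswith (PySem.Str.strip line) "/" ||
                PySem.Str.startswith (PySem.Str.strip line) "./" ||
                PySem.Str.startswith (PySem.Str.strip line) "../" ||
                PySem.Str.startswith (PySem.Str.strip line) "~/") = true
            · have hp : pvIsPath line = true := by unfold pvIsPath; rw [hs]; simp [h]
              rw [if_neg h, if_pos hs]; simp [hp]
            · rw [Bool.not_eq_true] at hs
              have hp : pvIsPath line = false := by unfold pvIsPath; rw [hs]; simp
              rw [if_neg h, if_neg (by rw [hs]; simp)]; simp [hp])]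
  rw [PySem.List.foldl_append_if, filter_map_eq_filterMap]

theorem altGo_cons (line : String) (rest buf : List String) :
    extract_paths_from_output_altGo (line :: rest) buf =
      if pvIsPath line then
        (if (buf ++ [PySem.Str.strip line]).length = 5 then buf ++ [PySem.Str.strip line]
         else extract_paths_from_output_altGo rest (buf ++ [PySem.Str.strip line]))
      else extract_paths_from_output_altGo rest buf := rfl

theorem altGo_eq (lines : List String) (buf : List String) (hb : buf.length < 5) :
    extract_paths_from_output_altGo lines buf = (buf ++ lines.filterMap pvExtract).take 5 := by
  induction lines generalizing buf with
  | nil =>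
    simp [extract_paths_from_output_altGo, List.take_of_length_le (Nat.le_of_lt hb)]
  | cons line rest ih =>
    rw [altGo_cons, List.filterMap_cons]
    by_cases hc : pvIsPath line = true
    · rw [if_pos hc, show pvExtract line = some (PySem.Str.strip line) by simp [pvExtract, hc]]
      by_cases h5 : (buf ++ [PySem.Str.strip line]).length = 5
      · rw [if_pos h5]
        have hsplit : buf ++ (PySem.Str.strip line :: rest.filterMap pvExtract)
            = (buf ++ [PySem.Str.strip line]) ++ rest.filterMap pvExtract := by simp
        rw [hsplit, List.take_append_of_le_length (by omega),
            List.take_of_length_le (by omega)]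
      · have hlt : (buf ++ [PySem.Str.strip line]).length < 5 := by
          simp at h5 ⊢; omega
        rw [if_neg h5, ih _ hlt]
        simp
    · rw [if_neg hc, show pvExtract line = none by simp [pvExtract, hc], ih _ hb]

theorem main_eq (output : String) :
    extract_paths_from_output output = extract_paths_from_output_alt output := by
  unfold extract_paths_from_output extract_paths_from_output_alt
  rw [foldA_eq, altGo_eq _ _ (by simp)]
  simp only [List.nil_append, List.filterMap_reverse]
  rw [PySem.List.slice_from_neg_ofNat _ 5 (by omega)]
  generalize (PySem.Str.splitlines output).filterMap pvExtract = f
  rw [List.take_reverse, List.reverse_reverse]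

-- ===== VERDICT (by name: the statement is the Claim_ definition above) =====
theorem extract_paths_from_output_spec : Claim_equal_extract_paths_from_output := by
  intro output _
  exact main_eq output
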